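-- pv_equiv track=rewrite | github.com/yskang/AlgorithmPractice | baekjoon/python/multinomial_coefficient_16725.py | solution
-- ===== SOURCE A (Python) =====
-- MOD = 1000000009
--
-- def solution(a: int, n: int, k: int):
--     window_size = a+1
--     a_list = [1] * (a+1)
--     temp = [1] * (a+1)
--     for _ in range(n-1):
--         temp = [0 for i in range(window_size)]
--         temp[0] = a_list[0]
--
--         for i in range(1, window_size):
--             temp[i] = (temp[i-1] + (a_list[i] % MOD)) % MOD
--
--         for i in range(window_size, len(a_list)+window_size-1):
--             temp.append((temp[-1]-a_list[i-window_size] + (a_list[i] if i < len(a_list) else 0))%MOD )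
--         a_list = temp
--     return temp[k]
-- ===== SOURCE B (Python) =====
-- # B: closed form by inclusion-exclusion over the coordinates that exceed a:
-- # [x^k] (1+x+...+x^a)^n = sum_j (-1)^j C(n,j) C(k-j(a+1)+n-1, n-1)  (mod MOD).
-- from math import comb
--
-- MOD = 1000000009
--
--
-- def solution(a: int, n: int, k: int):
--     length = n * a + 1            # number of coefficients of (1+x+...+x^a)**n for n >= 1
--     pos = k if k >= 0 else k + length   # the vector index A's final temp[k] addresses
--     total = 0
--     for j in range(min(n, pos // (a + 1)) + 1):
--         term = comb(n, j) * comb(pos - j * (a + 1) + n - 1, n - 1)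
--         total = total + term if j % 2 == 0 else total - term
--     return total % MOD
-- ===== Notes on version B (the rewrite author's own statement) =====
-- stated objective: faster
-- what changed: Replaces A's n-1 rounds of sliding-window polynomial multiplication (maintaining the full coefficient list) by the inclusion-exclusion closed form [x^k](1+x+...+x^a)^n = sum_j (-1)^j C(n,j) C(k-j(a+1)+n-1,n-1) mod 1e9+9, evaluated with exact integer binomials in a single short loop of at most min(n, k/(a+1))+1 terms.
-- outside the precondition, e.g. on solution(2, 0, 1): A returns 1, B raises ValueError
import Mathlib
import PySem

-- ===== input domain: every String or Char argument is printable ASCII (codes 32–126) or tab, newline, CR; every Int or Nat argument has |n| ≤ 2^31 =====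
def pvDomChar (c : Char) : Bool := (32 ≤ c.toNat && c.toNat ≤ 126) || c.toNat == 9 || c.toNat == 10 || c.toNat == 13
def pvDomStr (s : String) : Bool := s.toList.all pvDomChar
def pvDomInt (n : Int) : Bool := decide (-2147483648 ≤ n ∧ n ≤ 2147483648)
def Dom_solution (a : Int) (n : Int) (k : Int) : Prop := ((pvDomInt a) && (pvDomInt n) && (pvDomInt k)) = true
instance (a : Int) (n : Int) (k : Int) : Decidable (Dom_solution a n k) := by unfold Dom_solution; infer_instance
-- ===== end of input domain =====

-- B replaces A's row-by-row sliding-window DP (O(n^2*a) work) by the inclusion-exclusion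
-- closed form [x^k](1+x+...+x^a)^n = Σ_j (-1)^j C(n,j) C(k-j(a+1)+n-1, n-1) mod 1000000009.

-- ===== PORT A =====
def MODV : Int := 1000000009

-- one pass of A's outer loop: temp = prefix sums of a_list[0..a], then the sliding window appends
def stepA (a : Int) (aList : List Int) : List Int :=
  let ws := a + 1
  let temp : List Int := List.replicate ws.toNat 0
  -- temp[0] = a_list[0] (in-range assignment; Python raises on the empty list, excluded by Pre_)
  let temp := temp.set 0 (PySem.List.pyGetD aList 0 0)
  let temp := (PySem.List.pyRange 1 ws 1).foldl
    (fun t i => t.set i.toNat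
      (PySem.Int.mod (PySem.List.pyGetD t (i-1) 0 + PySem.Int.mod (PySem.List.pyGetD aList i 0) MODV) MODV)) temp
  (PySem.List.pyRange ws ((aList.length : Int) + ws - 1) 1).foldl
    (fun t i => t ++ [PySem.Int.mod
        (PySem.List.pyGetD t (-1) 0 - PySem.List.pyGetD aList (i - ws) 0
          + (if i < (aList.length : Int) then PySem.List.pyGetD aList i 0 else 0)) MODV]) temp

-- a_list and temp start as equal lists and the loop body keeps them equal, so one accumulator carries both
def solution (a : Int) (n : Int) (k : Int) : Int :=
  let aList : List Int := List.replicate (a+1).toNat 1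
  let temp := (List.range (n-1).toNat).foldl (fun al _ => stepA a al) aList
  PySem.List.pyGetD temp k 0

-- ===== PORT B =====
def solution_alt (a : Int) (n : Int) (k : Int) : Int :=
  let length := n * a + 1
  let pos := if k ≥ 0 then k else k + length
  let total := (PySem.List.pyRange 0 (min n (PySem.Int.floordiv pos (a+1)) + 1) 1).foldl
    (fun total j =>
      let term : Int := (Nat.choose n.toNat j.toNat : Int) *
        (Nat.choose (pos - j * (a+1) + n - 1).toNat (n-1).toNat : Int)
      if PySem.Int.mod j 2 = 0 then total + term else total - term) 0
  PySem.Int.mod total MODV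

-- ===== PRECONDITION & SPEC =====
-- Pre_ keeps the natural domain of the problem (a ≥ 0, at least one factor n ≥ 1, k a valid index):
-- for a < 0 or k outside ±(n*a+1) A raises IndexError, and for n ≤ 0 A skips its loop and returns
-- an entry of the unprocessed initial list [1]*(a+1) instead of a coefficient of (1+...+x^a)^n.
def Pre_solution (a : Int) (n : Int) (k : Int) : Prop :=
  0 ≤ a ∧ 1 ≤ n ∧ -(n*a+1) ≤ k ∧ k < n*a+1
instance (a : Int) (n : Int) (k : Int) : Decidable (Pre_solution a n k) := by
  unfold Pre_solution; infer_instance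
def pvWitness_solution : Int × Int × Int := (2, 3, 4)
def Spec_solution (a : Int) (n : Int) (k : Int) (out : Int) : Prop := out = solution_alt a n k
instance (a : Int) (n : Int) (k : Int) (out : Int) : Decidable (Spec_solution a n k out) := by
  unfold Spec_solution; infer_instance

-- ===== CLAIM (what is proved, stated in full; the proofs are below) =====
def Claim_equal_solution : Prop := ∀ (a : Int) (n : Int) (k : Int),
  Dom_solution a n k → Pre_solution a n k → Spec_solution a n k (solution a n k)

-- ===== LEMMAS AND PROOFS =====

-- exact number of (x_1,...,x_n), 0 ≤ x_i ≤ a, with sum k: the coefficient both programs reduce mod MODV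
def cntZ (a : ℕ) : ℕ → ℤ → ℤ
  | 0, k => if k = 0 then 1 else 0
  | n+1, k => ∑ i ∈ Finset.range (a+1), cntZ a n (k - i)

lemma cntZ_neg (a : ℕ) : ∀ (n : ℕ) (k : ℤ), k < 0 → cntZ a n k = 0 := by
  intro n
  induction n with
  | zero =>
    intro k hk
    simp only [cntZ, if_neg (by omega : ¬ k = 0)]
  | succ m ih =>
    intro k hk
    simp only [cntZ]
    refine Finset.sum_eq_zero (fun i _ => ih _ ?_)
    have : (0:ℤ) ≤ (i : ℤ) := Int.natCast_nonneg i
    omega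

lemma cntZ_big (a : ℕ) : ∀ (n : ℕ) (k : ℤ), (n * a : ℤ) < k → cntZ a n k = 0 := by
  intro n
  induction n with
  | zero =>
    intro k hk
    simp only [Nat.cast_zero, zero_mul] at hk
    simp only [cntZ, if_neg (by omega : ¬ k = 0)]
  | succ m ih =>
    intro k hk
    simp only [cntZ]
    refine Finset.sum_eq_zero (fun i hi => ih _ ?_)
    have hi' : (i : ℤ) ≤ a := by
      exact_mod_cast Nat.lt_succ_iff.mp (Finset.mem_range.mp hi)
    push_cast at hk ⊢
    nlinarith

lemma cntZ_slide (a : ℕ) (n : ℕ) (k : ℤ) :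
    cntZ a (n+1) k = cntZ a (n+1) (k-1) + cntZ a n k - cntZ a n (k - (a+1)) := by
  have h2 := Finset.sum_range_sub' (fun i => cntZ a n (k - i)) (a+1)
  have h : cntZ a (n+1) k - cntZ a (n+1) (k-1)
      = ∑ i ∈ Finset.range (a+1), (cntZ a n (k - i) - cntZ a n (k - (i+1:ℕ))) := by
    simp only [cntZ, ← Finset.sum_sub_distrib]
    refine Finset.sum_congr rfl (fun i _ => ?_)
    congr 2
    push_cast
    ring
  rw [h2] at h
  have e0 : k - ((0:ℕ):ℤ) = k := by push_cast; ring
  have e1 : k - ((a+1:ℕ):ℤ) = k - (a+1) := by push_cast; ring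
  rw [e0, e1] at h
  linarith

lemma cntZ_one (a : ℕ) (k : ℤ) : cntZ a 1 k = if 0 ≤ k ∧ k ≤ a then 1 else 0 := by
  simp only [cntZ]
  by_cases hk : 0 ≤ k ∧ k ≤ a
  · rw [if_pos hk]
    rw [Finset.sum_congr rfl (g := fun i => if i = k.toNat then (1:ℤ) else 0)
      (fun i _ => by
        have : k - (i:ℤ) = 0 ↔ i = k.toNat := by omega
        simp only [cntZ]
        split_ifs with h1 h2 h2 <;> first | rfl | (exact absurd (this.mp h1) h2) | (exact absurd (this.mpr h2) h1))]
    rw [Finset.sum_ite_eq' (Finset.range (a+1)) k.toNat (fun _ => (1:ℤ))]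
    rw [if_pos (Finset.mem_range.mpr (by omega))]
  · rw [if_neg hk]
    refine Finset.sum_eq_zero (fun i hi => ?_)
    have hi' := Finset.mem_range.mp hi
    have : ¬ (k - (i:ℤ) = 0) := by omega
    simp only [if_neg this]

-- Hc d m = C(m+d, d) for m ≥ 0, else 0 (the number of weak compositions of m in d+1 parts)
def Hc (d : ℕ) (m : ℤ) : ℤ := if m < 0 then 0 else ((m.toNat + d).choose d : ℤ)

lemma Hc_sub (d : ℕ) (m : ℤ) : Hc (d+1) m - Hc (d+1) (m-1) = Hc d m := by
  unfold Hc
  rcases lt_trichotomy m 0 with hm | hm | hm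
  · rw [if_pos hm, if_pos (by omega : m - 1 < 0), if_pos hm]; ring
  · subst hm
    rw [if_neg (by omega), if_pos (by omega : (0:ℤ) - 1 < 0), if_neg (by omega)]
    simp
  · rw [if_neg (by omega), if_neg (by omega), if_neg (by omega)]
    have ht : m.toNat = (m-1).toNat + 1 := by omega
    rw [ht]
    rw [show (m-1).toNat + 1 + (d+1) = ((m-1).toNat + d + 1) + 1 by ring,
        show (m-1).toNat + (d+1) = (m-1).toNat + d + 1 by ring]
    rw [Nat.choose_succ_succ ((m-1).toNat + d + 1) d]
    push_cast
    simp only [Nat.succ_eq_add_one]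
    ring_nf

lemma Hc_window (a d : ℕ) (m : ℤ) :
    ∑ i ∈ Finset.range (a+1), Hc d (m - i) = Hc (d+1) m - Hc (d+1) (m - (a+1)) := by
  induction a with
  | zero =>
    simpa using (Hc_sub d m).symm
  | succ b ih =>
    rw [Finset.sum_range_succ, ih]
    have := Hc_sub d (m - (b+1))
    push_cast
    push_cast at ih this ⊢
    have e : m - (b+1) - 1 = m - (b+1+1) := by ring
    rw [e] at this
    linarith

-- Pascal step for the alternating sums of cntZ_formula
lemma abel_step (d : ℕ) (T : ℕ → ℤ) :
    ∑ j ∈ Finset.range (d+3), (-1)^j * ((d+2).choose j : ℤ) * T j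
      = (∑ j ∈ Finset.range (d+2), (-1)^j * ((d+1).choose j : ℤ) * T j)
        - ∑ j ∈ Finset.range (d+2), (-1)^j * ((d+1).choose j : ℤ) * T (j+1) := by
  rw [show d+3 = (d+2)+1 from rfl,
      Finset.sum_range_succ' (fun j => (-1)^j * ((d+2).choose j : ℤ) * T j) (d+2),
      show d+2 = (d+1)+1 from rfl,
      Finset.sum_range_succ' (fun j => (-1)^j * ((d+1).choose j : ℤ) * T j) (d+1)]
  have hz : ∑ j ∈ Finset.range ((d+1)+1), (-1)^(j+1) * ((d+1).choose (j+1) : ℤ) * T (j+1)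
      = ∑ j ∈ Finset.range (d+1), (-1)^(j+1) * ((d+1).choose (j+1) : ℤ) * T (j+1) := by
    rw [Finset.sum_range_succ, Nat.choose_succ_self]
    simp
  have hterm : ∀ j, (-1:ℤ)^(j+1) * ((d+2).choose (j+1) : ℤ) * T (j+1)
      = ((-1)^(j+1) * ((d+1).choose (j+1) : ℤ) * T (j+1))
        - ((-1)^j * ((d+1).choose j : ℤ) * T (j+1)) := by
    intro j
    rw [Nat.choose_succ_succ (d+1) j]
    push_cast
    ring
  rw [Finset.sum_congr rfl (fun j _ => hterm j), Finset.sum_sub_distrib, ← hz]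
  simp only [Nat.choose_zero_right, Nat.cast_one, pow_zero, one_mul]
  ring

-- the inclusion-exclusion identity B rests on
lemma cntZ_formula (a : ℕ) : ∀ (d : ℕ) (k : ℤ),
    cntZ a (d+1) k
      = ∑ j ∈ Finset.range (d+2), (-1)^j * ((d+1).choose j : ℤ) * Hc d (k - j*(a+1)) := by
  intro d
  induction d with
  | zero =>
    intro k
    rw [cntZ_one, Finset.sum_range_succ, Finset.sum_range_one]
    simp only [Hc, pow_zero, pow_one, Nat.choose_self, Nat.choose_zero_right, Nat.cast_one,
      Nat.cast_zero, Nat.cast_one, one_mul, neg_one_mul]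
    split_ifs <;> omega
  | succ d ih =>
    intro k
    have hdef : cntZ a (d+1+1) k = ∑ i ∈ Finset.range (a+1), cntZ a (d+1) (k - i) := rfl
    rw [hdef]
    have step1 : ∑ i ∈ Finset.range (a+1), cntZ a (d+1) (k - i)
        = ∑ j ∈ Finset.range (d+2), (-1)^j * ((d+1).choose j : ℤ) *
            (∑ i ∈ Finset.range (a+1), Hc d ((k - j*(a+1)) - i)) := by
      have e1 : ∑ i ∈ Finset.range (a+1), cntZ a (d+1) (k - i)
          = ∑ i ∈ Finset.range (a+1), ∑ j ∈ Finset.range (d+2),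
              (-1)^j * ((d+1).choose j : ℤ) * Hc d ((k - i) - j*(a+1)) :=
        Finset.sum_congr rfl (fun i _ => ih (k - i))
      rw [e1, Finset.sum_comm]
      refine Finset.sum_congr rfl (fun j _ => ?_)
      rw [Finset.mul_sum]
      exact Finset.sum_congr rfl (fun i _ => by rw [show k - i - j*(a+1) = k - j*(a+1) - i by ring])
    rw [step1]
    have step2 : ∀ j : ℕ, ∑ i ∈ Finset.range (a+1), Hc d ((k - j*(a+1)) - i)
        = Hc (d+1) (k - j*(a+1)) - Hc (d+1) (k - (j+1:ℕ)*(a+1)) := by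
      intro j
      rw [Hc_window a d (k - j*(a+1))]
      congr 2
      push_cast
      ring
    have e2 : ∑ j ∈ Finset.range (d+2), (-1)^j * ((d+1).choose j : ℤ) *
            (∑ i ∈ Finset.range (a+1), Hc d ((k - j*(a+1)) - i))
        = ∑ j ∈ Finset.range (d+2), (-1)^j * ((d+1).choose j : ℤ) *
            (Hc (d+1) (k - j*(a+1)) - Hc (d+1) (k - (j+1:ℕ)*(a+1))) :=
      Finset.sum_congr rfl (fun j _ => by rw [step2 j])
    rw [e2]
    have := abel_step d (fun j => Hc (d+1) (k - j*(a+1)))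
    simp only [mul_sub] at *
    rw [Finset.sum_sub_distrib]
    rw [show d+1+2 = d+3 from rfl, this]

-- B's port computes exactly cntZ (mod MODV) on the natural domain
lemma solution_alt_eq (a n k : Int) (ha : 0 ≤ a) (hn : 1 ≤ n)
    (hk1 : -(n*a+1) ≤ k) (hk2 : k < n*a+1) :
    solution_alt a n k
      = (cntZ a.toNat n.toNat (if k ≥ 0 then k else k + (n*a+1))) % MODV := by
  obtain ⟨d, hd⟩ : ∃ d, n.toNat = d + 1 := ⟨n.toNat - 1, by omega⟩
  have hA : ((a.toNat : ℤ)) = a := Int.toNat_of_nonneg ha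
  have hN : ((n.toNat : ℤ)) = n := Int.toNat_of_nonneg (by omega)
  have hMpos : (0:ℤ) < MODV := by unfold MODV; norm_num
  unfold solution_alt
  set pos : ℤ := if k ≥ 0 then k else k + (n*a+1) with hposdef
  have hpos0 : 0 ≤ pos := by
    rw [hposdef]; split_ifs with h
    · omega
    · nlinarith
  have hpos1 : pos ≤ n*a := by
    rw [hposdef]; split_ifs with h <;> omega
  have ha1 : (0:ℤ) < a + 1 := by omega
  set fd : ℤ := PySem.Int.floordiv pos (a+1) with hfd
  have hfd0 : 0 ≤ fd := by
    rw [hfd]; exact (PySem.Int.le_floordiv_iff_mul_le ha1).mpr (by omega)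
  set jm : ℤ := min n fd with hjm
  have hjm0 : 0 ≤ jm := le_min (by omega) hfd0
  have hjmn : jm ≤ n := min_le_left _ _
  set m : ℕ := (jm + 1).toNat with hm
  have hmc : ((m : ℤ)) = jm + 1 := Int.toNat_of_nonneg (by omega)
  have hmd : m ≤ d + 2 := by omega
  rw [PySem.Int.mod_eq_emod_of_pos hMpos]
  congr 1
  -- turn the fold into a Finset sum of the signed terms
  rw [show jm + 1 = ((m:ℕ):ℤ) from hmc.symm, PySem.List.pyRange_zero_natCast, List.foldl_map]
  set F : ℕ → ℤ := fun j => (-1)^j * (((d+1).choose j : ℕ) : ℤ) * Hc d (pos - j*(a+1)) with hF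
  have hbody : List.foldl
      (fun (total : ℤ) (j : ℕ) =>
        (fun (total : ℤ) (j : ℤ) =>
          if PySem.Int.mod j 2 = 0
          then total + (Nat.choose n.toNat j.toNat : ℤ) *
            (Nat.choose (pos - j * (a+1) + n - 1).toNat (n-1).toNat : ℤ)
          else total - (Nat.choose n.toNat j.toNat : ℤ) *
            (Nat.choose (pos - j * (a+1) + n - 1).toNat (n-1).toNat : ℤ)) total (↑j : ℤ))
      0 (List.range m)
      = List.foldl (fun total j => total + F j) 0 (List.range m) := by
    refine PySem.List.foldl_congr_mem _ _ _ _ (fun acc j hj => ?_)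
    have hjm' : (j:ℤ) ≤ jm := by
      have := List.mem_range.mp hj; omega
    have hjfd : (j:ℤ) * (a+1) ≤ pos := by
      have : (j:ℤ) ≤ fd := le_trans hjm' (min_le_right _ _)
      exact (PySem.Int.le_floordiv_iff_mul_le ha1).mp this
    have hnn : ¬ (pos - (j:ℤ)*(a+1) < 0) := by omega
    have hch : (pos - (j:ℤ) * (a+1) + n - 1).toNat = (pos - (j:ℤ)*(a+1)).toNat + d := by omega
    have hterm : (Nat.choose n.toNat (↑j : ℤ).toNat : ℤ) *
        (Nat.choose (pos - (↑j:ℤ) * (a+1) + n - 1).toNat (n-1).toNat : ℤ)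
        = (((d+1).choose j : ℕ) : ℤ) * Hc d (pos - j*(a+1)) := by
      rw [hd, Int.toNat_natCast, hch, show (n-1).toNat = d by omega, Hc, if_neg hnn]
    have hmod : PySem.Int.mod (↑j:ℤ) 2 = ((j % 2 : ℕ) : ℤ) := by
      exact_mod_cast PySem.Int.mod_natCast j 2
    beta_reduce
    rcases Nat.even_or_odd j with hev | hod
    · have h2 : j % 2 = 0 := Nat.even_iff.mp hev
      rw [if_pos (by rw [hmod, h2]; rfl)]
      rw [hterm]
      simp only [hF, Even.neg_one_pow hev, one_mul]
    · have h2 : j % 2 = 1 := Nat.odd_iff.mp hod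
      rw [if_neg (by rw [hmod, h2]; simp)]
      rw [hterm]
      simp only [hF, Odd.neg_one_pow hod, neg_one_mul]
      ring
  rw [hbody, PySem.List.foldl_add]
  have hsum : (List.map F (List.range m)).sum = ∑ j ∈ Finset.range m, F j := rfl
  rw [hsum]
  have hext : ∑ j ∈ Finset.range m, F j = ∑ j ∈ Finset.range (d+2), F j := by
    refine Finset.sum_subset (fun x hx => Finset.mem_range.mpr (lt_of_lt_of_le (Finset.mem_range.mp hx) hmd)) (fun j hj hj' => ?_)
    have hge : jm < (j:ℤ) := by
      have h1 : ¬ j < m := fun hc => hj' (Finset.mem_range.mpr hc)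
      omega
    have hcase := min_lt_iff.mp hge
    simp only [hF]
    rcases hcase with hnlt | hfdlt
    · have : d + 1 < j := by omega
      rw [Nat.choose_eq_zero_of_lt this]
      simp
    · have hlt : pos < (j:ℤ) * (a+1) := by
        have := (PySem.Int.floordiv_lt_iff_lt_mul ha1).mp hfdlt
        omega
      simp only [Hc]
      rw [if_pos (by omega : pos - (j:ℤ)*(a+1) < 0)]
      ring
  rw [hext]
  have hform := cntZ_formula a.toNat d pos
  rw [hd, hform, zero_add]
  refine Finset.sum_congr rfl (fun j _ => ?_)
  simp only [hF, hA]

-- ---------- A-side: the sliding-window DP computes the same coefficients mod MODV ----------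

-- row of coefficients of (1+x+...+x^a)^N reduced mod MODV, as A's lists hold them
def rowL (A N : ℕ) : List ℤ := List.map (fun (m : ℕ) => cntZ A N (m:ℤ) % MODV) (List.range (N*A+1))

lemma set_map_range {β : Type} (f : ℕ → β) (N i : ℕ) (v : β) :
    (List.map f (List.range N)).set i v
      = List.map (fun m => if m = i then v else f m) (List.range N) := by
  apply List.ext_getElem
  · simp
  · intro idx h1 h2
    simp only [List.getElem_set, List.getElem_map, List.getElem_range]
    simp only [List.length_set, List.length_map, List.length_range] at h1
    split_ifs with hx hy hy
    · rfl
    · omega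
    · omega
    · rfl

lemma pyGetD_map_range_wrap (f : ℕ → ℤ) (M : ℕ) (k : ℤ) (d : ℤ)
    (h0 : -(M:ℤ) ≤ k) (h1 : k < M) :
    PySem.List.pyGetD (List.map f (List.range M)) k d
      = f (if 0 ≤ k then k else k + M).toNat := by
  simp only [PySem.List.pyGetD, PySem.List.pyGet?, PySem.List.pyIdx?,
    List.length_map, List.length_range]
  split_ifs with hk
  · simp only [Option.bind_some, List.getElem?_map,
      List.getElem?_range (by omega : k.toNat < M), Option.map_some, Option.getD_some]
  · simp only [Option.bind_some, List.getElem?_map,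
      List.getElem?_range (by omega : M - (-k).toNat < M), Option.map_some, Option.getD_some]
    congr 1
    omega

lemma mod2_add (x y M : ℤ) : (x % M + y % M) % M = (x + y) % M := by
  have hx : Int.ModEq M (x % M) x := Int.emod_emod_of_dvd x dvd_rfl
  have hy : Int.ModEq M (y % M) y := Int.emod_emod_of_dvd y dvd_rfl
  exact hx.add hy

lemma mod3_sub_add (x y z M : ℤ) : (x % M - y % M + z % M) % M = (x - y + z) % M := by
  have hx : Int.ModEq M (x % M) x := Int.emod_emod_of_dvd x dvd_rfl
  have hy : Int.ModEq M (y % M) y := Int.emod_emod_of_dvd y dvd_rfl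
  have hz : Int.ModEq M (z % M) z := Int.emod_emod_of_dvd z dvd_rfl
  exact (hx.sub hy).add hz

lemma cntZ_succ_zero (a N : ℕ) : cntZ a (N+1) 0 = cntZ a N 0 := by
  show (∑ i ∈ Finset.range (a+1), cntZ a N (0 - i)) = cntZ a N 0
  rw [Finset.sum_eq_single 0]
  · norm_num
  · intro i _ hi
    exact cntZ_neg a N _ (by have : 0 < i := Nat.pos_of_ne_zero hi; omega)
  · intro h
    exact absurd (Finset.mem_range.mpr (by omega)) h

lemma pyRange_self (b : ℤ) : PySem.List.pyRange b b 1 = [] := by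
  simp [PySem.List.pyRange]

-- phase 1 of stepA: the prefix-sum loop fills positions 1..A with the new row mod MODV
lemma phase1 (A N : ℕ) (hN : 1 ≤ N) (c : ℕ) (hc : c ≤ A) :
    (PySem.List.pyRange 1 (1 + (c:ℤ)) 1).foldl
      (fun t i => t.set i.toNat
        (PySem.Int.mod (PySem.List.pyGetD t (i-1) 0
          + PySem.Int.mod (PySem.List.pyGetD (rowL A N) i 0) MODV) MODV))
      (List.map (fun (m : ℕ) => if m = 0 then cntZ A (N+1) 0 % MODV else 0) (List.range (A+1)))
      = List.map (fun (m : ℕ) => if m ≤ c then cntZ A (N+1) (m:ℤ) % MODV else 0) (List.range (A+1)) := by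
  have hM : (0:ℤ) < MODV := by unfold MODV; norm_num
  induction c with
  | zero =>
    rw [show (1 + ((0:ℕ):ℤ)) = 1 by norm_num, pyRange_self]
    simp only [List.foldl_nil]
    exact List.map_congr_left (fun m _ => by
      by_cases h : m = 0
      · subst h; simp
      · rw [if_neg h, if_neg (by omega)])
  | succ c ih =>
    have hc' : c ≤ A := by omega
    have hsplit : PySem.List.pyRange 1 (1 + ((c+1:ℕ):ℤ)) 1
        = PySem.List.pyRange 1 (1 + (c:ℤ)) 1 ++ [1 + (c:ℤ)] := by
      rw [show (1 + ((c+1:ℕ):ℤ)) = (1 + (c:ℤ)) + 1 by push_cast; ring]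
      exact PySem.List.pyRange_one_succ_right (by omega)
    rw [hsplit, List.foldl_append, ih hc']
    simp only [List.foldl_cons, List.foldl_nil]
    have hi : (1 + (c:ℤ)) = ((c+1:ℕ):ℤ) := by push_cast; ring
    rw [hi]
    have hitoNat : ((c+1:ℕ):ℤ).toNat = c + 1 := Int.toNat_natCast _
    have hsub : ((c+1:ℕ):ℤ) - 1 = ((c:ℕ):ℤ) := by push_cast; ring
    rw [hitoNat, hsub]
    -- the two reads
    rw [PySem.List.pyGetD_natCast, PySem.List.getD_map_range _ _ _ _ (by omega)]
    rw [if_pos (le_refl c)]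
    have hrow : PySem.List.pyGetD (rowL A N) ((c+1:ℕ):ℤ) 0 = cntZ A N ((c+1:ℕ):ℤ) % MODV := by
      rw [rowL, PySem.List.pyGetD_natCast,
        PySem.List.getD_map_range _ _ _ _ (by nlinarith [Nat.one_le_iff_ne_zero.mp hN] : c + 1 < N*A+1)]
    rw [hrow]
    -- arithmetic on the stored value
    rw [PySem.Int.mod_eq_emod_of_pos hM, PySem.Int.mod_eq_emod_of_pos hM,
      Int.emod_emod_of_dvd _ dvd_rfl, mod2_add]
    have hslide := cntZ_slide A N ((c+1:ℕ):ℤ)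
    have hneg : cntZ A N (((c+1:ℕ):ℤ) - (A+1)) = 0 :=
      cntZ_neg A N _ (by push_cast; omega)
    have hval : cntZ A (N+1) ((c:ℕ):ℤ) + cntZ A N ((c+1:ℕ):ℤ) = cntZ A (N+1) ((c+1:ℕ):ℤ) := by
      rw [hslide, hneg]
      have : ((c+1:ℕ):ℤ) - 1 = ((c:ℕ):ℤ) := by push_cast; ring
      rw [this]
      ring
    rw [hval]
    -- fold the set back into the map
    rw [set_map_range]
    exact List.map_congr_left (fun m hm => by
      have := List.mem_range.mp hm
      split_ifs with h1 h2 h2 <;> first | rfl | omega | (subst h1; rfl))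

-- phase 2 of stepA: the sliding-window append loop extends the row to its full length
lemma phase2 (A N : ℕ) (_hN : 1 ≤ N) (c : ℕ) (hc : c ≤ N*A) :
    (PySem.List.pyRange ((A:ℤ)+1) ((A:ℤ)+1+(c:ℤ)) 1).foldl
      (fun t i => t ++ [PySem.Int.mod
        (PySem.List.pyGetD t (-1) 0 - PySem.List.pyGetD (rowL A N) (i - ((A:ℤ)+1)) 0
          + (if i < ((rowL A N).length : Int) then PySem.List.pyGetD (rowL A N) i 0 else 0)) MODV])
      (List.map (fun (m : ℕ) => cntZ A (N+1) (m:ℤ) % MODV) (List.range (A+1)))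
      = List.map (fun (m : ℕ) => cntZ A (N+1) (m:ℤ) % MODV) (List.range (A+1+c)) := by
  have hM : (0:ℤ) < MODV := by unfold MODV; norm_num
  have hlen : ((rowL A N).length : ℤ) = ((N*A+1 : ℕ) : ℤ) := by
    simp [rowL]
  induction c with
  | zero =>
    rw [show ((A:ℤ)+1+((0:ℕ):ℤ)) = (A:ℤ)+1 by norm_num, pyRange_self]
    simp
  | succ c ih =>
    have hc' : c ≤ N*A := by omega
    have hsplit : PySem.List.pyRange ((A:ℤ)+1) ((A:ℤ)+1+((c+1:ℕ):ℤ)) 1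
        = PySem.List.pyRange ((A:ℤ)+1) ((A:ℤ)+1+(c:ℤ)) 1 ++ [(A:ℤ)+1+(c:ℤ)] := by
      rw [show ((A:ℤ)+1+((c+1:ℕ):ℤ)) = ((A:ℤ)+1+(c:ℤ)) + 1 by push_cast; ring]
      exact PySem.List.pyRange_one_succ_right (by omega)
    rw [hsplit, List.foldl_append, ih hc']
    simp only [List.foldl_cons, List.foldl_nil]
    have hi : (A:ℤ)+1+(c:ℤ) = ((A+1+c:ℕ):ℤ) := by push_cast; ring
    rw [hi]
    -- the last element of the accumulated row
    have hlast : PySem.List.pyGetD (List.map (fun (m : ℕ) => cntZ A (N+1) (m:ℤ) % MODV) (List.range (A+1+c))) (-1) 0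
        = cntZ A (N+1) ((A+c:ℕ):ℤ) % MODV := by
      rw [pyGetD_map_range_wrap _ _ _ _ (by push_cast; omega) (by push_cast; omega)]
      rw [if_neg (by omega)]
      rw [show ((-1 : ℤ) + ((A+1+c : ℕ):ℤ)).toNat = A + c from by omega]
    rw [hlast]
    -- the subtracted entry
    have hsub : ((A+1+c:ℕ):ℤ) - ((A:ℤ)+1) = ((c:ℕ):ℤ) := by push_cast; ring
    rw [hsub]
    have hsubval : PySem.List.pyGetD (rowL A N) ((c:ℕ):ℤ) 0 = cntZ A N ((c:ℕ):ℤ) % MODV := by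
      rw [rowL, PySem.List.pyGetD_natCast, PySem.List.getD_map_range _ _ _ _ (by omega)]
    rw [hsubval]
    -- the added entry (present only while the old row is long enough)
    have hadd : (if ((A+1+c:ℕ):ℤ) < ((rowL A N).length : Int)
          then PySem.List.pyGetD (rowL A N) ((A+1+c:ℕ):ℤ) 0 else 0)
        = cntZ A N ((A+1+c:ℕ):ℤ) % MODV := by
      rw [hlen]
      split_ifs with hlt
      · rw [rowL, PySem.List.pyGetD_natCast,
          PySem.List.getD_map_range _ _ _ _ (by exact_mod_cast hlt)]
      · rw [cntZ_big A N _ (by push_cast at hlt ⊢; omega), Int.zero_emod]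
    rw [hadd]
    -- arithmetic on the appended value
    rw [PySem.Int.mod_eq_emod_of_pos hM, mod3_sub_add]
    have hslide := cntZ_slide A N ((A+1+c:ℕ):ℤ)
    rw [show ((A+1+c:ℕ):ℤ) - 1 = ((A+c:ℕ):ℤ) from by push_cast; ring,
        show ((A+1+c:ℕ):ℤ) - ((A:ℤ)+1) = ((c:ℕ):ℤ) from by push_cast; ring] at hslide
    have hval : cntZ A (N+1) ((A+c:ℕ):ℤ) - cntZ A N ((c:ℕ):ℤ) + cntZ A N ((A+1+c:ℕ):ℤ)
        = cntZ A (N+1) ((A+1+c:ℕ):ℤ) := by rw [hslide]; ring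
    rw [hval]
    -- append one more entry of the new row
    rw [show A+1+(c+1) = (A+1+c)+1 from by omega, List.range_succ, List.map_append]
    rfl

lemma stepA_row (a : ℤ) (A N : ℕ) (hA : a = (A:ℤ)) (hN : 1 ≤ N) :
    stepA a (rowL A N) = rowL A (N+1) := by
  subst hA
  have hM : (0:ℤ) < MODV := by unfold MODV; norm_num
  dsimp only [stepA]
  have htn : ((A:ℤ)+1).toNat = A + 1 := by omega
  rw [htn]
  -- the seeded first cell
  have h0 : PySem.List.pyGetD (rowL A N) 0 0 = cntZ A (N+1) 0 % MODV := by
    rw [rowL, PySem.List.pyGetD_of_nonneg _ _ (by omega)]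
    rw [show (0:ℤ).toNat = 0 from rfl, PySem.List.getD_map_range _ _ _ _ (by omega)]
    rw [cntZ_succ_zero, Nat.cast_zero]
  rw [h0]
  have hrep : (List.replicate (A+1) (0:ℤ)) = List.map (fun (_ : ℕ) => (0:ℤ)) (List.range (A+1)) := by
    simp
  rw [hrep, set_map_range]
  -- phase 1
  have hr1 : ((A:ℤ)+1) = 1 + ((A:ℕ):ℤ) := by ring
  have hph1 := phase1 A N hN A (le_refl A)
  rw [← hr1] at hph1
  rw [hph1]
  have hdrop : List.map (fun (m : ℕ) => if m ≤ A then cntZ A (N+1) (m:ℤ) % MODV else 0) (List.range (A+1))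
      = List.map (fun (m : ℕ) => cntZ A (N+1) (m:ℤ) % MODV) (List.range (A+1)) :=
    List.map_congr_left (fun m hm => if_pos (by have := List.mem_range.mp hm; omega))
  rw [hdrop]
  -- phase 2
  have hr2 : ((rowL A N).length : ℤ) + ((A:ℤ)+1) - 1 = (A:ℤ)+1+((N*A:ℕ):ℤ) := by
    simp only [rowL, List.length_map, List.length_range]
    push_cast
    ring
  have hph2 := phase2 A N hN (N*A) (le_refl _)
  rw [← hr2] at hph2
  rw [hph2]
  rw [rowL, show (N+1)*A+1 = A+1+N*A from by ring]

lemma init_row (A : ℕ) : List.replicate (A+1) (1:ℤ) = rowL A 1 := by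
  have h1 : (1:ℤ) % MODV = 1 := by decide
  apply List.ext_getElem
  · simp [rowL]
  · intro i hi1 hi2
    simp only [rowL, List.getElem_replicate, List.getElem_map, List.getElem_range]
    simp only [List.length_replicate] at hi1
    rw [cntZ_one, if_pos (by constructor <;> [positivity; (push_cast; omega)]), h1]

lemma iter_row (a : ℤ) (A : ℕ) (hA : a = (A:ℤ)) :
    ∀ t : ℕ, (List.range t).foldl (fun al _ => stepA a al) (rowL A 1) = rowL A (1+t) := by
  intro t
  induction t with
  | zero => rfl
  | succ t ih =>
    rw [List.range_succ, List.foldl_append, ih]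
    simp only [List.foldl_cons, List.foldl_nil]
    rw [stepA_row a A (1+t) hA (by omega), show 1+(t+1) = (1+t)+1 from by omega]

-- ===== VERDICT (by name: the statement is the Claim_ definition above) =====
theorem solution_spec : Claim_equal_solution := by
  intro a n k _ hpre
  obtain ⟨ha, hn, hk1, hk2⟩ := hpre
  unfold Spec_solution
  have hA : a = ((a.toNat : ℕ) : ℤ) := (Int.toNat_of_nonneg ha).symm
  have hN : n = ((n.toNat : ℕ) : ℤ) := (Int.toNat_of_nonneg (by omega)).symm
  set A := a.toNat with hAdef
  set N := n.toNat with hNdef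
  have hN1 : 1 ≤ N := by omega
  have hcast : n*a+1 = ((N*A+1 : ℕ) : ℤ) := by rw [hA, hN]; push_cast; ring
  -- the A side
  dsimp only [solution]
  rw [show (a+1).toNat = A + 1 from by omega, init_row,
    show (n-1).toNat = N - 1 from by omega, iter_row a A hA (N-1),
    show 1 + (N-1) = N from by omega]
  rw [rowL, pyGetD_map_range_wrap _ _ _ _ (by rw [← hcast]; omega) (by rw [← hcast]; omega)]
  -- the B side
  rw [solution_alt_eq a n k ha hn hk1 hk2]
  have hpos0 : 0 ≤ (if k ≥ 0 then k else k + (n*a+1)) := by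
    split_ifs with h
    · omega
    · have : 0 ≤ n*a := by nlinarith
      omega
  have hifeq : (if 0 ≤ k then k else k + ((N*A+1 : ℕ) : ℤ)) = (if k ≥ 0 then k else k + (n*a+1)) := by
    rw [hcast]
  rw [hifeq]
  rw [Int.toNat_of_nonneg hpos0]
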